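-- pv_equiv track=rewrite | github.com/alexandraback/datacollection | solutions_5634697451274240_0/Python/SsnL/sol.py | find
-- ===== SOURCE A (Python) =====
-- def find(s):
--     p = s[0]
--     i = 1
--     c = 0
--     while i < len(s):
--         if s[i] != p:
--             c += 1
--         p = s[i]
--         i += 1
--     return c + (p == '-')
-- ===== SOURCE B (Python) =====
-- def find(s):
--     # Divide and conquer: transitions in s[lo:hi] = transitions in each half
--     # plus the one possible transition across the midpoint boundary.
--     def trans(lo, hi):
--         if hi - lo < 2:
--             return 0
--         mid = (lo + hi) // 2
--         return trans(lo, mid) + trans(mid, hi) + (s[mid] != s[mid - 1])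
--     return trans(0, len(s)) + (s[-1] == '-')
-- ===== Notes on version B (the rewrite author's own statement) =====
-- stated objective: alternative
-- what changed: B counts adjacent-character transitions by divide and conquer on the index range (each half recursively plus the midpoint boundary comparison) instead of A's left-to-right scan carrying the previous character, and does the trailing-dash check via s[-1].
import Mathlib
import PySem

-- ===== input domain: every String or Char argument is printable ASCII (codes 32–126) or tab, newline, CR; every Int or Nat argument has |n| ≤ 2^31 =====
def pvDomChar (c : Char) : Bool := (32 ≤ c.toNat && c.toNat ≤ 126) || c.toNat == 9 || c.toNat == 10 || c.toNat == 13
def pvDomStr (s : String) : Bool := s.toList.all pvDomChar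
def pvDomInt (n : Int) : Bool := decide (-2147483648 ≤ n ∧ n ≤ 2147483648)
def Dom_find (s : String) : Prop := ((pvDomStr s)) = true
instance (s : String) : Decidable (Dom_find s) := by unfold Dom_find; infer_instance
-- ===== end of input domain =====

-- B counts transitions by divide and conquer on the index range (halves plus the
-- midpoint boundary comparison); A scans left to right carrying the previous character.

-- ===== PORT A =====
-- the while loop: state (p, c); at each step compare s[i] with p, then set p := s[i]
def findLoop : Char → Int → List Char → Int
  | p, c, [] => c + (if p = '-' then 1 else 0)
  | p, c, x :: xs => findLoop x (if x ≠ p then c + 1 else c) xs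

def find (s : String) : Int :=
  match s.toList with
  | [] => 0        -- unreachable under Pre_find: Python raises IndexError at s[0]
  | p :: rest => findLoop p 0 rest

-- ===== PORT B =====
-- trans(lo, hi): transitions inside s[lo:hi], splitting the range at its midpoint
def transDC (l : List Char) (lo hi : Nat) : Int :=
  if hi - lo < 2 then 0
  else
    transDC l lo ((lo + hi) / 2) + transDC l ((lo + hi) / 2) hi +
      (if l.getD ((lo + hi) / 2) ' ' ≠ l.getD ((lo + hi) / 2 - 1) ' ' then 1 else 0)
termination_by hi - lo
decreasing_by all_goals omega

def find_alt (s : String) : Int :=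
  transDC s.toList 0 s.toList.length +
    (match PySem.List.pyGet? s.toList (-1) with
     | some c => if c = '-' then 1 else 0
     | none => 0)   -- unreachable under Pre_find: Python raises IndexError at s[-1]

-- ===== PRECONDITION & SPEC =====
-- Pre_ excludes only the empty string, on which both A (s[0]) and B (s[-1]) raise IndexError.
def Pre_find (s : String) : Prop := s ≠ ""
instance (s : String) : Decidable (Pre_find s) := by unfold Pre_find; infer_instance
def pvWitness_find : String := "a-b"
def Spec_find (s : String) (out : Int) : Prop := out = find_alt s
instance (s : String) (out : Int) : Decidable (Spec_find s out) := by unfold Spec_find; infer_instance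

-- ===== CLAIM (what is proved, stated in full; the proofs are below) =====
def Claim_equal_find : Prop := ∀ (s : String), Dom_find s → Pre_find s → Spec_find s (find s)

-- ===== LEMMAS AND PROOFS =====

-- specification function: transition count of a contiguous list
def T : List Char → Int
  | [] => 0
  | [_] => 0
  | x :: y :: xs => (if x = y then 0 else 1) + T (y :: xs)

theorem T_short (l : List Char) (h : l.length ≤ 1) : T l = 0 := by
  match l with
  | [] => rfl
  | [_] => rfl
  | _ :: _ :: _ => simp at h

theorem T_append (a : List Char) (c : Char) (b : List Char) :
    T (a ++ c :: b) = T a + T (c :: b) +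
      (match a.getLast? with
       | some d => if d = c then (0 : Int) else 1
       | none => 0) := by
  induction a with
  | nil => simp [T]
  | cons x a' ih =>
    match a' with
    | [] => simp [T]; split_ifs <;> ring
    | y :: a'' =>
      have : (x :: y :: a'') ++ c :: b = x :: (y :: a'' ++ c :: b) := by simp
      rw [this]
      show T (x :: (y :: (a'' ++ c :: b))) = _
      simp only [T, List.getLast?_cons_cons]
      rw [show y :: (a'' ++ c :: b) = (y :: a'') ++ c :: b by simp, ih]
      ring

theorem transDC_eq (n : Nat) : ∀ (l : List Char) (lo hi : Nat), hi - lo = n →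
    hi ≤ l.length → transDC l lo hi = T ((l.drop lo).take (hi - lo)) := by
  induction n using Nat.strong_induction_on with
  | _ n ih =>
    intro l lo hi hn hle
    rw [transDC]
    by_cases hsmall : hi - lo < 2
    · rw [if_pos hsmall]
      exact (T_short _ (by simp; omega)).symm
    · rw [if_neg hsmall]
      set mid := (lo + hi) / 2 with hmid
      have h1 : lo < mid := by omega
      have h2 : mid < hi := by omega
      have hsplit : (l.drop lo).take (hi - lo) =
          (l.drop lo).take (mid - lo) ++ (l.drop mid).take (hi - mid) := by
        rw [show hi - lo = (mid - lo) + (hi - mid) by omega, List.take_add,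
          List.drop_drop, show lo + (mid - lo) = mid by omega]
      -- the right half is nonempty; expose its head
      have hmidlt : mid < l.length := by omega
      have hhead : ((l.drop mid).take (hi - mid)).head? = some (l.getD mid ' ') := by
        have : hi - mid ≠ 0 := by omega
        rw [List.head?_take, List.head?_drop]
        simp [List.getD, List.getElem?_eq_getElem hmidlt, this]
      match hr : (l.drop mid).take (hi - mid) with
      | [] => rw [hr] at hhead; simp at hhead
      | c :: b =>
        rw [hr] at hhead
        have hc : c = l.getD mid ' ' := by simpa using hhead
        have hlast : ((l.drop lo).take (mid - lo)).getLast? = some (l.getD (mid - 1) ' ') := by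
          have hlen : ((l.drop lo).take (mid - lo)).length = mid - lo := by
            simp; omega
          rw [List.getLast?_eq_getElem?, hlen]
          rw [List.getElem?_take_of_lt (by omega), List.getElem?_drop]
          have hm1 : lo + (mid - lo - 1) = mid - 1 := by omega
          rw [hm1]
          simp [List.getD, List.getElem?_eq_getElem (show mid - 1 < l.length by omega)]
        rw [hsplit, hr, T_append, hlast]
        rw [ih (mid - lo) (by omega) l lo mid rfl (by omega),
          ← hr, ih (hi - mid) (by omega) l mid hi rfl hle]
        simp only [hc]
        split_ifs <;> simp_all

theorem findLoop_acc (p : Char) (c : Int) (xs : List Char) :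
    findLoop p c xs = c + findLoop p 0 xs := by
  induction xs generalizing p c with
  | nil => simp [findLoop]
  | cons x xs ih =>
    simp only [findLoop]
    rw [ih, ih x (if x ≠ p then 0 + 1 else 0)]
    split_ifs <;> ring

theorem findLoop_eq (p : Char) (xs : List Char) :
    findLoop p 0 xs = T (p :: xs) +
      (match PySem.List.pyGet? (p :: xs) (-1) with
       | some c => if c = '-' then (1 : Int) else 0
       | none => 0) := by
  induction xs generalizing p with
  | nil =>
    simp [findLoop, T, PySem.List.pyGet?_neg_one, List.getLast?]
  | cons y ys ih =>
    show findLoop y (if y ≠ p then 0 + 1 else 0) ys = _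
    rw [findLoop_acc, ih y]
    have hlast : PySem.List.pyGet? (p :: y :: ys) (-1) =
        PySem.List.pyGet? (y :: ys) (-1) := by
      rw [PySem.List.pyGet?_neg_one, PySem.List.pyGet?_neg_one]
      simp [List.getLast?_cons]
    rw [hlast]
    simp only [T]
    split_ifs with h1 h2 h2 <;> simp_all
    ring

-- ===== VERDICT =====
theorem find_spec : Claim_equal_find := by
  intro s _ hpre
  unfold Spec_find find find_alt
  have hne : s.toList ≠ [] := by
    intro h
    exact hpre (by cases s; simp_all)
  match hlist : s.toList with
  | [] => exact absurd hlist hne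
  | p :: rest =>
    rw [transDC_eq ((p :: rest).length - 0) _ 0 (p :: rest).length rfl (by omega)]
    simp only [List.drop_zero, Nat.sub_zero, List.take_length]
    exact findLoop_eq p rest
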